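-- pv_equiv track=rewrite | github.com/tairabiteru/nintab | nintab/decorators.py | construct_cron_string
-- ===== SOURCE A (Python) =====
-- import typing as t
--
-- REGEX = {
--     'unit': r"(seconds?|minutes?|hours?|days?|weeks?|months?|years?){1}",
--     'weekday': r"((sun|mon|tues|wednes|thurs|fri|satur)days?){1}",
--     'int': r"\d+",
--     'time': r"([0-1]?[0-9]|2[0-3]):[0-5][0-9](:[0-5][0-9])?",
--     'season': r"(spring)|(summer)|(autumn)|(fall)|(winter){1}"
-- }
--
-- def construct_cron_string(cron_format: str) -> t.Tuple[str, t.List[str]]: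
--     patterns: t.List[str] = []
--     in_regex = False
--     current = ""
--
--     for char in cron_format:
--         if in_regex is True:
--             if char == "}":
--                 in_regex = False
--                 patterns.append(REGEX[current])
--                 current = ""
--             else:
--                 current += char
--         else:
--             if char == "{":
--                 in_regex = True
--
--     for key, regex in REGEX.items():
--         key = "{" + key + "}"
--
--         if key in cron_format:
--             cron_format = cron_format.replace(key, regex)
--
--     return cron_format, patterns
-- ===== SOURCE B (Python) =====
-- import typing as t
-- import re
--
-- REGEX = {
--     'unit': r"(seconds?|minutes?|hours?|days?|weeks?|months?|years?){1}",
--     'weekday': r"((sun|mon|tues|wednes|thurs|fri|satur)days?){1}",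
--     'int': r"\d+",
--     'time': r"([0-1]?[0-9]|2[0-3]):[0-5][0-9](:[0-5][0-9])?",
--     'season': r"(spring)|(summer)|(autumn)|(fall)|(winter){1}"
-- }
--
-- def construct_cron_string(cron_format: str) -> t.Tuple[str, t.List[str]]:
--     patterns = [REGEX[k] for k in re.findall(r"\{([^}]*)\}", cron_format)]
--     for key, regex in REGEX.items():
--         key = "{" + key + "}"
--
--         if key in cron_format:
--             cron_format = cron_format.replace(key, regex)
--     return cron_format, patterns
-- ===== Notes on version B (the rewrite author's own statement) =====
-- stated objective: idiomatic
-- what changed: The character-by-character in_regex state machine that extracts brace-delimited keys is replaced by a single regex scan (re.findall with a [^}]* group) feeding a list comprehension, which also moves the scanning loop from Python bytecode into the regex engine; the substitution loop over REGEX.items() is kept so the returned string, and which missing key raises KeyError, are identical.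
import Mathlib
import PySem

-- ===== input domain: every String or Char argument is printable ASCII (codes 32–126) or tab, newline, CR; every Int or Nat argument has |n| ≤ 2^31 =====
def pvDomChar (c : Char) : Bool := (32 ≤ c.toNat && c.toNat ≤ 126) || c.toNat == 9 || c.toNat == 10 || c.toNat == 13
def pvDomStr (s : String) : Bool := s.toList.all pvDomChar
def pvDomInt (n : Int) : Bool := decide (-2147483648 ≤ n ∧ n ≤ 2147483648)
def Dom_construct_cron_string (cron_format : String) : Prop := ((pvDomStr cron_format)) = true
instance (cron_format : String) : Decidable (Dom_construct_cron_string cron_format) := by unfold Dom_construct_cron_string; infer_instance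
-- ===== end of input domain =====

-- B replaces A's character-level in_regex state machine by a regex-style scan for the
-- brace-delimited groups (idiomatic); the substitution loop over REGEX is unchanged, so
-- the returned string is identical.

-- the module constant REGEX, as an association list of (key, regex) over List Char
def pvREGEX : List (List Char × List Char) :=
  [("unit".toList, "(seconds?|minutes?|hours?|days?|weeks?|months?|years?){1}".toList),
   ("weekday".toList, "((sun|mon|tues|wednes|thurs|fri|satur)days?){1}".toList),
   ("int".toList, "\\d+".toList),
   ("time".toList, "([0-1]?[0-9]|2[0-3]):[0-5][0-9](:[0-5][0-9])?".toList),
   ("season".toList, "(spring)|(summer)|(autumn)|(fall)|(winter){1}".toList)]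

-- REGEX[current]: dict lookup; [] stands for Python's KeyError and is excluded by Pre_
def pvLookup : List (List Char × List Char) → List Char → List Char
  | [], _ => []
  | (k, v) :: rest, cur => if k = cur then v else pvLookup rest cur

-- ===== PORT A =====
-- one iteration of A's 'for char in cron_format' state machine; state = (patterns, in_regex, current)
def pvStepA (st : List (List Char) × Bool × List Char) (char : Char) :
    List (List Char) × Bool × List Char :=
  match st with
  | (patterns, in_regex, current) =>
    if in_regex then
      if char = '}' then (patterns ++ [pvLookup pvREGEX current], false, [])
      else (patterns, in_regex, current ++ [char])
    else
      if char = '{' then (patterns, true, current)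
      else (patterns, in_regex, current)

def construct_cron_string (cron_format : String) : String × List String :=
  let fin := cron_format.toList.foldl pvStepA (([] : List (List Char)), false, ([] : List Char))
  let cf := pvREGEX.foldl (fun cf kv =>
      let key := '{' :: (kv.1 ++ ['}'])
      if PySem.Chars.isIn key cf then PySem.Chars.replace cf key kv.2 else cf)
    cron_format.toList
  (String.mk cf, fin.1.map String.mk)

-- ===== PORT B =====
-- hand port of B's re.findall of a brace-delimited group with a greedy non-closing-brace
-- body: exact, because after an opening brace that body runs to the first following closing
-- brace (and an opening brace with no later closing brace matches nowhere)
-- mode = none: outside a group (scanning for an opening brace); mode = some acc: inside a group, acc collected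
def pvScanB : List Char → Option (List Char) → List (List Char)
  | [], _ => []
  | c :: rest, none => if c = '{' then pvScanB rest (some []) else pvScanB rest none
  | c :: rest, some acc => if c = '}' then acc :: pvScanB rest none else pvScanB rest (some (acc ++ [c]))

def pvFindall (s : List Char) : List (List Char) := pvScanB s none

def construct_cron_string_alt (cron_format : String) : String × List String :=
  let patterns := (pvFindall cron_format.toList).map (fun k => String.mk (pvLookup pvREGEX k))
  let cf := pvREGEX.foldl (fun cf kv =>
      let key := '{' :: (kv.1 ++ ['}'])
      if PySem.Chars.isIn key cf then PySem.Chars.replace cf key kv.2 else cf)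
    cron_format.toList
  (String.mk cf, patterns)

-- ===== PRECONDITION & SPEC =====
-- Pre_ excludes exactly the inputs where some brace-delimited key (in each chunk of the
-- split on closing braces before the last, the part after the first opening brace, if
-- any) is not a key of REGEX:
-- there both Pythons raise KeyError (A in the state machine, B in the comprehension).
def Pre_construct_cron_string (cron_format : String) : Prop :=
  ∀ seg ∈ (cron_format.toList.splitOn '}').dropLast,
    '{' ∈ seg → ∃ kv ∈ pvREGEX, kv.1 = (seg.dropWhile (· ≠ '{')).tail
instance (cron_format : String) : Decidable (Pre_construct_cron_string cron_format) := by
  unfold Pre_construct_cron_string; infer_instance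

def pvWitness_construct_cron_string : String := "at {time} every {int} {unit}"

def Spec_construct_cron_string (cron_format : String) (out : String × List String) : Prop := out = construct_cron_string_alt cron_format
instance (cron_format : String) (out : String × List String) : Decidable (Spec_construct_cron_string cron_format out) := by unfold Spec_construct_cron_string; infer_instance

-- ===== CLAIM (what is proved, stated in full; the proofs are below) =====
def Claim_equal_construct_cron_string : Prop := ∀ (cron_format : String), Dom_construct_cron_string cron_format → Pre_construct_cron_string cron_format → Spec_construct_cron_string cron_format (construct_cron_string cron_format)

-- ===== LEMMAS AND PROOFS =====

-- A's state machine, started in a reachable state, collects exactly B's findall groups (looked up)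
lemma pvScan_eq (cs : List Char) : ∀ (ps : List (List Char)) (b : Bool) (cur : List Char),
    (b = false → cur = []) →
    (cs.foldl pvStepA (ps, b, cur)).1
      = ps ++ (pvScanB cs (if b then some cur else none)).map (pvLookup pvREGEX) := by
  induction cs with
  | nil =>
    intro ps b cur _
    cases b <;> simp [pvScanB]
  | cons c rest ih =>
    intro ps b cur hinv
    cases b with
    | true =>
      by_cases hc : c = '}'
      · have hst : pvStepA (ps, true, cur) c = (ps ++ [pvLookup pvREGEX cur], false, []) := by
          simp [pvStepA, hc]
        simp only [List.foldl_cons, hst]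
        rw [ih _ false [] (fun _ => rfl)]
        simp [pvScanB, hc]
      · have hst : pvStepA (ps, true, cur) c = (ps, true, cur ++ [c]) := by
          simp [pvStepA, hc]
        simp only [List.foldl_cons, hst]
        rw [ih _ true (cur ++ [c]) (by simp)]
        simp [pvScanB, hc]
    | false =>
      have hcur : cur = [] := hinv rfl
      subst hcur
      by_cases hc : c = '{'
      · have hst : pvStepA (ps, false, []) c = (ps, true, []) := by
          simp [pvStepA, hc]
        simp only [List.foldl_cons, hst]
        rw [ih _ true [] (by simp)]
        simp [pvScanB, hc]
      · have hst : pvStepA (ps, false, []) c = (ps, false, []) := by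
          simp [pvStepA, hc]
        simp only [List.foldl_cons, hst]
        rw [ih _ false [] (fun _ => rfl)]
        simp [pvScanB, hc]

-- ===== VERDICT (by name: the statement is the Claim_ definition above) =====
theorem construct_cron_string_spec : Claim_equal_construct_cron_string := by
  intro cron_format _ _
  unfold Spec_construct_cron_string construct_cron_string construct_cron_string_alt
  refine Prod.ext rfl ?_
  simp only []
  rw [pvScan_eq _ [] false [] (fun _ => rfl)]
  simp [pvFindall, List.map_map, Function.comp_def]
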